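-- pv_equiv track=rewrite | github.com/daniel-reich/turbo-robot | hzs9hZXpgYdGM3iwB_16.py | alternating_caps
-- ===== SOURCE A (Python) =====
-- def alternating_caps(txt):
--   cnter = 0
--   out = ""
--   for letter in txt:
--     if not letter == ' ':
--       cnter += 1
--
--     if cnter % 2 != 0:
--       out += letter.upper()
--     else:
--       out += letter.lower()
--
--   return out
-- ===== SOURCE B (Python) =====
-- def alternating_caps(txt):
--   letters = [c for c in txt if c != ' ']
--   cased = [c.upper() if i % 2 == 0 else c.lower() for i, c in enumerate(letters)]
--   it = iter(cased)
--   return ''.join(c if c == ' ' else next(it) for c in txt)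
-- ===== Notes on version B (the rewrite author's own statement) =====
-- stated objective: alternative
-- what changed: Replaces the single counter-driven scan that cases each character inline with a split/transform/reinterleave decomposition: extract the non-space characters, case them by enumerated index, then merge them back into the original text around the spaces.
import Mathlib
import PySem

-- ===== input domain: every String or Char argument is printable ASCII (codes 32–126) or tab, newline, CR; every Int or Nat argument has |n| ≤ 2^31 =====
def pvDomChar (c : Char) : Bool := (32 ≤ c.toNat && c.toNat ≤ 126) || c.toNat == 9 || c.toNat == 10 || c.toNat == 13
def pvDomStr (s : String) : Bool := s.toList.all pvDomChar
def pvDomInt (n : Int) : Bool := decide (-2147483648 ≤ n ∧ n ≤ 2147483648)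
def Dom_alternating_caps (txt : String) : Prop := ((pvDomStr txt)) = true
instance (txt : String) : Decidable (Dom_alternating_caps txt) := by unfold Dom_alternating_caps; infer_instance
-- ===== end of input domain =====

-- B replaces A's single counter-driven in-place casing scan by a split / case-by-index / reinterleave
-- decomposition (alternative structure, same asymptotic cost).

-- ===== PORT A =====
-- one loop step of A: update the non-space counter, append the cased character
def pvStepA (st : Int × List Char) (letter : Char) : Int × List Char :=
  let cnter := if ¬ (letter = ' ') then st.1 + 1 else st.1
  let out := if PySem.Int.mod cnter 2 ≠ 0 then st.2 ++ [PySem.Chars.upperChar letter]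
             else st.2 ++ [PySem.Chars.lowerChar letter]
  (cnter, out)

def alternating_caps (txt : String) : String :=
  let st := txt.toList.foldl pvStepA ((0 : Int), ([] : List Char))
  String.mk st.2

-- ===== PORT B =====
-- case a letter by its enumerated index: even → upper, odd → lower
def pvCaseAt (i : Int) (c : Char) : Char :=
  if PySem.Int.mod i 2 = 0 then PySem.Chars.upperChar c else PySem.Chars.lowerChar c

-- merge: spaces from the text as-is, every other position pulls the next pre-cased letter
-- (the iterator can never be exhausted at a non-space position; [] there is unreachable)
def pvReinterleave : List Char → List Char → List Char
  | [], _ => []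
  | c :: rest, cs =>
      if c = ' ' then ' ' :: pvReinterleave rest cs
      else match cs with
        | [] => []
        | d :: ds => d :: pvReinterleave rest ds

def alternating_caps_alt (txt : String) : String :=
  let letters := txt.toList.filter (fun c => c ≠ ' ')
  let cased := (PySem.List.enumerate letters).map (fun p => pvCaseAt p.1 p.2)
  String.mk (pvReinterleave txt.toList cased)

-- ===== PRECONDITION & SPEC =====
def Spec_alternating_caps (txt : String) (out : String) : Prop := out = alternating_caps_alt txt
instance (txt : String) (out : String) : Decidable (Spec_alternating_caps txt out) := by unfold Spec_alternating_caps; infer_instance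

-- ===== CLAIM (what is proved, stated in full; the proofs are below) =====
def Claim_equal_alternating_caps : Prop := ∀ (txt : String), Dom_alternating_caps txt → Spec_alternating_caps txt (alternating_caps txt)

-- ===== LEMMAS AND PROOFS =====

lemma pvUpper_space : PySem.Chars.upperChar ' ' = ' ' := by decide
lemma pvLower_space : PySem.Chars.lowerChar ' ' = ' ' := by decide

lemma pvStepA_space (n : Int) (acc : List Char) : pvStepA (n, acc) ' ' = (n, acc ++ [' ']) := by
  simp only [pvStepA]
  split_ifs <;> simp_all [pvUpper_space, pvLower_space]

lemma pvStepA_nonspace (n : Int) (acc : List Char) (c : Char) (hc : c ≠ ' ') :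
    pvStepA (n, acc) c = (n + 1, acc ++ [pvCaseAt n c]) := by
  have h1 : PySem.Int.mod (n + 1) 2 = (n + 1) % 2 :=
    PySem.Int.mod_eq_emod_of_pos (by norm_num)
  have h2 : PySem.Int.mod n 2 = n % 2 :=
    PySem.Int.mod_eq_emod_of_pos (by norm_num)
  simp only [pvStepA, pvCaseAt, hc, not_false_iff, if_true, h1, h2]
  rcases Int.emod_two_eq_zero_or_one n with h | h
  · have hne : (n + 1) % 2 ≠ 0 := by omega
    simp [hne, h]
  · have heq : (n + 1) % 2 = 0 := by omega
    simp [heq, h]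

-- main invariant: folding A's step from counter n produces acc ++ (reinterleave of the
-- index-cased non-space letters enumerated from n)
lemma pvMain (l : List Char) : ∀ (n : Int) (acc : List Char),
    (l.foldl pvStepA (n, acc)).2
      = acc ++ pvReinterleave l
          ((PySem.List.enumerate (l.filter (fun c => c ≠ ' ')) n).map (fun p => pvCaseAt p.1 p.2)) := by
  induction l with
  | nil => intro n acc; simp [pvReinterleave]
  | cons c rest ih =>
    intro n acc
    by_cases hc : c = ' '
    · subst hc
      rw [List.foldl_cons, pvStepA_space, ih n]
      simp [pvReinterleave, List.filter_cons]
    · rw [List.foldl_cons, pvStepA_nonspace n acc c hc, ih (n + 1)]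
      simp [pvReinterleave, hc, List.filter_cons, PySem.List.enumerate_cons]

theorem alternating_caps_spec : Claim_equal_alternating_caps := by
  intro txt _
  unfold Spec_alternating_caps alternating_caps alternating_caps_alt
  simp only [pvMain txt.toList 0 [], List.nil_append]
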